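-- pv_equiv track=rewrite | github.com/Kanomble/oligostore | oligostore/core/services/primer_binding.py | iter_mismatch_counts
-- ===== SOURCE A (Python) =====
-- def iter_mismatch_counts(sequence: str, primer: str):
--     primer_len = len(primer)
--     window_count = len(sequence) - primer_len + 1
--     if window_count <= 0:
--         return
--
--     mismatch_counts = [0] * window_count
--     for offset, primer_base in enumerate(primer):
--         for index, seq_base in enumerate(
--             sequence[offset : offset + window_count]
--         ):
--             if seq_base != primer_base:
--                 mismatch_counts[index] += 1
--
--     yield from mismatch_counts
-- ===== SOURCE B (Python) =====
-- def iter_mismatch_counts(sequence: str, primer: str):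
--     # window-major: one direct mismatch count per window (no shared accumulator array)
--     for start in range(len(sequence) - len(primer) + 1):
--         yield sum(a != b for a, b in zip(sequence[start:], primer))
-- ===== Notes on version B (the rewrite author's own statement) =====
-- stated objective: alternative
-- what changed: A sweeps symbol-major over primer offsets, incrementing a shared mismatch-count array over sequence slices; B sweeps window-major, computing each window's mismatch count independently by zipping the window with the primer.
import Mathlib
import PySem

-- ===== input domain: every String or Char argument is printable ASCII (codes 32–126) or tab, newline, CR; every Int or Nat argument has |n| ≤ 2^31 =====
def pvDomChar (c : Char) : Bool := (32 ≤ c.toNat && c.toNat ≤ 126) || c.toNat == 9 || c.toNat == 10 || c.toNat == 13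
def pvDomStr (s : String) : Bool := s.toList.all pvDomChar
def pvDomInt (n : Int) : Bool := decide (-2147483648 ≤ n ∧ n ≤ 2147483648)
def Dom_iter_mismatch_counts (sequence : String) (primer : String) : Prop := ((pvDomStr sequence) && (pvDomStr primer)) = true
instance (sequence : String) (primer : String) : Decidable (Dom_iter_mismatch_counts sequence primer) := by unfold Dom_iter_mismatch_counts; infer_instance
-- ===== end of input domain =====

-- B replaces A's symbol-major sweep (shared count array updated once per primer offset) by an
-- independent per-window mismatch count; same asymptotic cost, different traversal (objective: alternative).

-- ===== PORT A =====
def iter_mismatch_counts (sequence : String) (primer : String) : List Int :=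
  let s := sequence.toList
  let p := primer.toList
  let primer_len : Int := (p.length : Int)
  let window_count : Int := (s.length : Int) - primer_len + 1
  if window_count ≤ 0 then []
  else
    (PySem.List.enumerate p 0).foldl
      (fun mismatch_counts op =>
        (PySem.List.enumerate (PySem.List.slice s (some op.1) (some (op.1 + window_count))) 0).foldl
          (fun mc iv =>
            if iv.2 ≠ op.2 then
              PySem.List.pySetD mc iv.1 (PySem.List.pyGetD mc iv.1 0 + 1)
            else mc)
          mismatch_counts)
      (List.replicate window_count.toNat 0)

-- ===== PORT B =====
def iter_mismatch_counts_alt (sequence : String) (primer : String) : List Int :=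
  let s := sequence.toList
  let p := primer.toList
  (PySem.List.pyRange 0 ((s.length : Int) - (p.length : Int) + 1) 1).map
    (fun start =>
      (((PySem.List.slice s (some start) none).zip p).map
        (fun ab => if ab.1 ≠ ab.2 then (1 : Int) else 0)).sum)

-- ===== PRECONDITION & SPEC =====
def Spec_iter_mismatch_counts (sequence : String) (primer : String) (out : List Int) : Prop := out = iter_mismatch_counts_alt sequence primer
instance (sequence : String) (primer : String) (out : List Int) : Decidable (Spec_iter_mismatch_counts sequence primer out) := by unfold Spec_iter_mismatch_counts; infer_instance

-- ===== CLAIM (what is proved, stated in full; the proofs are below) =====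
def Claim_equal_iter_mismatch_counts : Prop := ∀ (sequence : String) (primer : String), Dom_iter_mismatch_counts sequence primer → Spec_iter_mismatch_counts sequence primer (iter_mismatch_counts sequence primer)

-- ===== LEMMAS AND PROOFS =====

/-- Mismatch count of `q` against `s` starting at position `j` (all positions in range in our uses). -/
def pvCnt (s : List Char) : List Char → Nat → Int
  | [], _ => 0
  | c :: q, j => (if s.getD j ' ' ≠ c then (1 : Int) else 0) + pvCnt s q (j + 1)

/-- A's inner loop: add the mismatch indicator against `pb` at each position of the window. -/
theorem pv_take_set (acc : List Int) (j : Nat) (v : Int) (hj : j < acc.length) :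
    (acc.set j v).take (j + 1) = acc.take j ++ [v] := by
  rw [List.set_eq_take_cons_drop v hj, List.take_append]
  simp [Nat.min_eq_left hj.le]

theorem pv_drop_set (acc : List Int) (j : Nat) (v : Int) (hj : j < acc.length) :
    (acc.set j v).drop (j + 1) = acc.drop (j + 1) := by
  rw [List.set_eq_take_cons_drop v hj, List.drop_append]
  simp [Nat.min_eq_left hj.le]

/-- A's inner loop: add the mismatch indicator against `pb` at each position of the window. -/
theorem pv_inner (s : List Char) (pb : Char) :
    ∀ (w : List Char) (j : Nat) (acc : List Int), j + w.length ≤ acc.length →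
      (PySem.List.enumerate w (j : Int)).foldl
        (fun mc iv => if iv.2 ≠ pb then PySem.List.pySetD mc iv.1 (PySem.List.pyGetD mc iv.1 0 + 1) else mc)
        acc
      = acc.take j ++ (List.zipWith (fun a c => if c ≠ pb then a + 1 else a) (acc.drop j) w)
          ++ (acc.drop j).drop w.length := by
  intro w
  induction w with
  | nil => intro j acc h; simp [PySem.List.enumerate]
  | cons c w ih =>
    intro j acc h
    have hj : j < acc.length := by simp at h; omega
    have hd : acc.drop j = acc[j] :: acc.drop (j + 1) := List.drop_eq_getElem_cons hj
    have hgd : acc.getD j 0 = acc[j] := List.getD_eq_getElem acc 0 hj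
    rw [PySem.List.enumerate_cons]
    simp only [List.foldl_cons]
    have hcast : (j : Int) + 1 = ((j + 1 : Nat) : Int) := by push_cast; ring
    rw [hcast]
    rw [hd]
    simp only [List.zipWith_cons_cons, List.length_cons, List.drop_succ_cons]
    rw [List.drop_drop]
    by_cases hc : c ≠ pb
    · rw [if_pos hc]
      simp only [PySem.List.pySetD_natCast, PySem.List.pyGetD_natCast]
      rw [ih (j + 1) (acc.set j (acc.getD j 0 + 1)) (by simp at h ⊢; omega)]
      rw [pv_take_set acc j _ hj, pv_drop_set acc j _ hj]
      simp only [if_pos hc, hgd]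
      simp
    · rw [if_neg hc]
      rw [ih (j + 1) acc (by simp at h ⊢; omega)]
      have htake : acc.take (j + 1) = acc.take j ++ [acc[j]] := by
        rw [List.take_add_one, List.getElem?_eq_getElem hj]
        simp
      simp only [not_not] at hc
      rw [hc]
      have hif : (if pb ≠ pb then acc[j] + 1 else acc[j]) = acc[j] := if_neg (by simp)
      rw [hif, htake, List.append_assoc]
      simp only [List.singleton_append, List.drop_drop]
      simp
      rw [htake, List.append_assoc]
      simp only [List.singleton_append]

/-- The window slice is the full-length window when it fits. -/
theorem pv_slice_window (s : List Char) (off W : Nat) :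
    PySem.List.slice s (some (off : Int)) (some ((off : Int) + (W : Int))) = (s.drop off).take W :=
  PySem.List.slice_natCast_add s off W

/-- A's outer loop, on an accumulator given as a map over window indices. -/
theorem pv_outer (s : List Char) (W : Nat) (hW : 0 < W) :
    ∀ (q : List Char) (off : Nat) (f : Nat → Int), off + q.length + W ≤ s.length + 1 →
      (PySem.List.enumerate q (off : Int)).foldl
        (fun mismatch_counts op =>
          (PySem.List.enumerate (PySem.List.slice s (some op.1) (some (op.1 + (W : Int)))) 0).foldl
            (fun mc iv => if iv.2 ≠ op.2 then PySem.List.pySetD mc iv.1 (PySem.List.pyGetD mc iv.1 0 + 1) else mc)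
            mismatch_counts)
        ((List.range W).map f)
      = (List.range W).map (fun i => f i + pvCnt s q (off + i)) := by
  intro q
  induction q with
  | nil =>
    intro off f _
    simp [PySem.List.enumerate, pvCnt]
  | cons c q ih =>
    intro off f h
    have hfit : off + W ≤ s.length := by simp at h; omega
    rw [PySem.List.enumerate_cons]
    simp only [List.foldl_cons]
    -- the head step
    have hlen_w : ((s.drop off).take W).length = W := by
      simp; omega
    have hstep :
        (PySem.List.enumerate (PySem.List.slice s (some (off : Int)) (some ((off : Int) + (W : Int)))) 0).foldl
          (fun mc iv => if iv.2 ≠ c then PySem.List.pySetD mc iv.1 (PySem.List.pyGetD mc iv.1 0 + 1) else mc)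
          ((List.range W).map f)
        = (List.range W).map (fun i => f i + (if s.getD (off + i) ' ' ≠ c then (1 : Int) else 0)) := by
      rw [pv_slice_window]
      have hinner := pv_inner s c ((s.drop off).take W) 0 ((List.range W).map f) (by simp [hlen_w])
      simp only [Nat.cast_zero] at hinner
      rw [hinner]
      simp only [List.take_zero, List.drop_zero, List.nil_append, hlen_w]
      have hdropW : (((List.range W).map f)).drop W = [] := by simp
      rw [hdropW, List.append_nil]
      apply List.ext_getElem
      · simp [hlen_w]
      · intro i h1 h2
        have hiW : i < W := by simpa using h2
        rw [List.getElem_zipWith]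
        simp only [List.getElem_map, List.getElem_range, List.getElem_take, List.getElem_drop]
        have hidx : off + i < s.length := by omega
        have : s.getD (off + i) ' ' = s[off + i] := List.getD_eq_getElem s ' ' hidx
        rw [this]
        by_cases hc : s[off + i] ≠ c <;> simp [hc]
    rw [hstep]
    have hcast : (off : Int) + 1 = ((off + 1 : Nat) : Int) := by push_cast; ring
    rw [hcast, ih (off + 1) _ (by simp at h ⊢; omega)]
    apply List.map_congr_left
    intro i _
    simp only [pvCnt]
    have : off + 1 + i = off + i + 1 := by omega
    rw [this]
    ring

/-- B's per-window sum equals `pvCnt`. -/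
theorem pv_b_elem (s : List Char) :
    ∀ (q : List Char) (j : Nat), j + q.length ≤ s.length →
      (((s.drop j).zip q).map (fun ab => if ab.1 ≠ ab.2 then (1 : Int) else 0)).sum = pvCnt s q j := by
  intro q
  induction q with
  | nil => intro j _; simp [pvCnt]
  | cons c q ih =>
    intro j h
    have hj : j < s.length := by simp at h; omega
    rw [List.drop_eq_getElem_cons hj]
    simp only [List.zip_cons_cons, List.map_cons, List.sum_cons, pvCnt]
    rw [ih (j + 1) (by simp at h; omega)]
    have : s.getD j ' ' = s[j] := List.getD_eq_getElem s ' ' hj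
    rw [this]

-- ===== VERDICT (by name: the statement is the Claim_ definition above) =====
theorem iter_mismatch_counts_spec : Claim_equal_iter_mismatch_counts := by
  unfold Claim_equal_iter_mismatch_counts Spec_iter_mismatch_counts
  intro sequence primer _
  unfold iter_mismatch_counts iter_mismatch_counts_alt
  set s := sequence.toList with hs
  set p := primer.toList with hp
  by_cases hwc : ((s.length : Int) - (p.length : Int) + 1) ≤ 0
  · simp only [hwc, if_true]
    rw [PySem.List.pyRange_one_eq_nil (by omega)]
    simp
  · simp only [hwc, if_false]
    push_neg at hwc
    have hmn : p.length ≤ s.length := by omega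
    set W : Nat := ((s.length : Int) - (p.length : Int) + 1).toNat with hWdef
    have hWpos : 0 < W := by omega
    have hWeq : (W : Int) = (s.length : Int) - (p.length : Int) + 1 := by omega
    have hrepl : (List.replicate W (0 : Int)) = (List.range W).map (fun _ => (0 : Int)) := by
      simp [List.map_const]
    rw [hrepl]
    have houter := pv_outer s W hWpos p 0 (fun _ => 0) (by omega)
    simp only [Nat.cast_zero, Nat.zero_add] at houter
    rw [← hWeq, houter]
    -- B side
    rw [PySem.List.pyRange_one (0 : Int) (W : Int)]
    have : ((W : Int) - 0).toNat = W := by omega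
    rw [this, List.map_map]
    apply List.map_congr_left
    intro i hi
    have hiW : i < W := by simpa using hi
    simp only [Function.comp]
    have hz : (0 : Int) + (i : Nat) = ((i : Nat) : Int) := by push_cast; ring
    rw [hz, PySem.List.slice_from_natCast]
    rw [pv_b_elem s p i (by omega)]
    simp
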